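-- pv_equiv track=rewrite | github.com/boolYikes/algo-study | programmers/라인-코딩테스트/boolYikes.py | sum_comb
-- ===== SOURCE A (Python) =====
-- def sum_comb(stuff):
--     """Generate all possible sums by choosing one score from each subset"""
--     result = set()
--
--     def dfs(i, total):
--         if i == len(stuff):
--             result.add(total)
--             return
--         for val in stuff[i]:
--             dfs(i + 1, total + val)
--
--     dfs(0, 0)
--     # if i == len(stuff):
--     #     return possible_scores
--
--     # if i == 0:
--     #     possible_scores = stuff[i]
--
--     # for a in set(possible_scores):
--     #     for b in stuff[i+1]:
--     #         possible_scores.append(a + b)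
--
--     # i += 1
--
--     # if i + 1 == len(stuff):
--     #     return possible_scores
--
--     # return sum_comb(stuff, i, possible_scores)
--     return result
-- ===== SOURCE B (Python) =====
-- def sum_comb(stuff):
--     """Generate all possible sums by choosing one score from each subset"""
--     sums = {0}
--     for subset in stuff:
--         sums = {s + v for s in sums for v in subset}
--     return sums
-- ===== Notes on version B (the rewrite author's own statement) =====
-- stated objective: faster
-- what changed: Replaced the exhaustive DFS over all choice tuples (one recursive call per tuple) by an iterative level-by-level DP that keeps only the set of distinct partial sums after each subset, deduplicating between levels.
import Mathlib
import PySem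

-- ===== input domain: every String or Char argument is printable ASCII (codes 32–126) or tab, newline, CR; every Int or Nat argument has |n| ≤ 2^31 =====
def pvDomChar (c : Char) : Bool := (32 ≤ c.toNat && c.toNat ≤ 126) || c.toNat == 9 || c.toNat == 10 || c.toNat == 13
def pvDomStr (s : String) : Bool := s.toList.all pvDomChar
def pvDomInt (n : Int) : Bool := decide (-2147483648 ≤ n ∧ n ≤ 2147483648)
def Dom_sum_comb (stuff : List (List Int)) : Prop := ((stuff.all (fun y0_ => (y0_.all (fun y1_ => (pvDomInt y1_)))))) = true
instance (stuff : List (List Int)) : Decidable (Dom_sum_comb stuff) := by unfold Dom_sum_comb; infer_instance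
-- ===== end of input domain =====

-- B replaces A's exhaustive DFS over all choice tuples by a level-by-level DP over the set of
-- distinct partial sums, deduplicating between levels (faster; measured).


-- ===== PORT A =====
-- dfs(i, total) mutating the closed-over set 'result'; the set is threaded as an accumulator.
-- The final 'else result' branch is unreachable (dfs is only called with i ≤ len(stuff)).
def sumCombDfs (stuff : List (List Int)) (i : Nat) (total : Int) (result : PySem.Set Int) :
    PySem.Set Int :=
  if i = stuff.length then PySem.Set.add result total
  else if h : i < stuff.length then
    stuff[i].foldl (fun r v => sumCombDfs stuff (i + 1) (total + v) r) result
  else result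
termination_by stuff.length - i
decreasing_by omega

def sum_comb (stuff : List (List Int)) : List Int :=
  sumCombDfs stuff 0 0 PySem.Set.empty

-- ===== PORT B =====
-- sums = {0}; for subset in stuff: sums = {s + v for s in sums for v in subset}
def sum_comb_alt (stuff : List (List Int)) : List Int :=
  stuff.foldl
    (fun sums subset =>
      sums.foldl (fun acc s => subset.foldl (fun acc v => PySem.Set.add acc (s + v)) acc)
        PySem.Set.empty)
    (PySem.Set.ofList [0])

-- ===== PRECONDITION & SPEC =====
def Spec_sum_comb (stuff : List (List Int)) (out : List Int) : Prop := out = sum_comb_alt stuff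
instance (stuff : List (List Int)) (out : List Int) : Decidable (Spec_sum_comb stuff out) := by unfold Spec_sum_comb; infer_instance

-- ===== CLAIM (what is proved, stated in full; the proofs are below) =====
def Claim_equal_sum_comb : Prop := ∀ (stuff : List (List Int)), Dom_sum_comb stuff → Spec_sum_comb stuff (sum_comb stuff)

-- ===== LEMMAS AND PROOFS =====

-- fold Set.add over a list of candidates
def addAll (r : PySem.Set Int) (us : List Int) : PySem.Set Int := us.foldl PySem.Set.add r

-- the multiset of full sums reachable from partial sum t through the remaining subsets,
-- in A's DFS (lexicographic) enumeration order
def csums : List (List Int) → Int → List Int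
  | [], t => [t]
  | l :: ls, t => l.flatMap (fun v => csums ls (t + v))

-- the elements of us not in s, first occurrences, in order
def newOf : PySem.Set Int → List Int → List Int
  | _, [] => []
  | s, u :: us => if u ∈ s then newOf s us else u :: newOf (PySem.Set.add s u) us

-- A's dfs, structurally on the remaining subsets
def dfsS : List (List Int) → Int → PySem.Set Int → PySem.Set Int
  | [], t, r => PySem.Set.add r t
  | l :: ls, t, r => l.foldl (fun r v => dfsS ls (t + v) r) r

theorem addAll_flatMap (f : Int → List Int) :
    ∀ (us : List Int) (r : PySem.Set Int),
      addAll r (us.flatMap f) = us.foldl (fun r u => addAll r (f u)) r := by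
  intro us
  induction us with
  | nil => intro r; rfl
  | cons u us ih =>
    intro r
    simp only [List.flatMap_cons, List.foldl_cons, addAll, List.foldl_append]
    exact ih _

theorem sumCombDfs_eq_dfsS (stuff : List (List Int)) :
    ∀ (k i : Nat) (t : Int) (r : PySem.Set Int), stuff.length - i = k → i ≤ stuff.length →
      sumCombDfs stuff i t r = dfsS (stuff.drop i) t r := by
  intro k
  induction k with
  | zero =>
    intro i t r hk hle
    have : i = stuff.length := by omega
    subst this
    rw [sumCombDfs]
    simp [dfsS]
  | succ k ih =>
    intro i t r hk hle
    have hi : i < stuff.length := by omega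
    rw [sumCombDfs]
    rw [if_neg (by omega), dif_pos hi]
    rw [List.drop_eq_getElem_cons hi]
    show _ = stuff[i].foldl (fun r v => dfsS (stuff.drop (i + 1)) (t + v) r) r
    have hfun : (fun (r : PySem.Set Int) (v : Int) => sumCombDfs stuff (i + 1) (t + v) r)
        = fun r v => dfsS (stuff.drop (i + 1)) (t + v) r := by
      funext r v
      exact ih (i + 1) (t + v) r (by omega) (by omega)
    rw [hfun]

theorem dfsS_eq_addAll :
    ∀ (ls : List (List Int)) (t : Int) (r : PySem.Set Int),
      dfsS ls t r = addAll r (csums ls t) := by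
  intro ls
  induction ls with
  | nil => intro t r; rfl
  | cons l ls ih =>
    intro t r
    simp only [dfsS, csums, addAll_flatMap]
    exact PySem.List.foldl_congr_mem _ _ _ _ fun r v _ => ih (t + v) r

theorem mem_addAll {y : Int} {r : PySem.Set Int} {us : List Int} :
    y ∈ addAll r us ↔ y ∈ r ∨ y ∈ us := by
  have := PySem.Set.mem_foldl_add (f := fun x : Int => x) (l := us) (s := r) (y := y)
  simpa [addAll] using this

theorem addAll_noop {r : PySem.Set Int} {us : List Int} (h : ∀ y ∈ us, y ∈ r) :
    addAll r us = r := by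
  induction us with
  | nil => rfl
  | cons u us ih =>
    simp only [addAll, List.foldl_cons]
    rw [PySem.Set.add_of_mem (h u (by simp))]
    exact ih fun y hy => h y (by simp [hy])

theorem addAll_eq_append_newOf :
    ∀ (us : List Int) (s : PySem.Set Int), addAll s us = s ++ newOf s us := by
  intro us
  induction us with
  | nil => intro s; simp [addAll, newOf]
  | cons u us ih =>
    intro s
    simp only [addAll, List.foldl_cons, newOf]
    by_cases h : u ∈ s
    · rw [if_pos h, PySem.Set.add_of_mem h]
      exact ih s
    · rw [if_neg h]
      have := ih (PySem.Set.add s u)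
      rw [addAll] at this
      rw [this, PySem.Set.add_of_not_mem h, List.append_assoc]
      rfl

theorem addAll_flatMap_newOf (f : Int → List Int) :
    ∀ (us : List Int) (s : PySem.Set Int) (r : PySem.Set Int),
      (∀ x ∈ s, ∀ y ∈ f x, y ∈ r) →
      addAll r (us.flatMap f) = addAll r ((newOf s us).flatMap f) := by
  intro us
  induction us with
  | nil => intro s r _; simp [newOf]
  | cons u us ih =>
    intro s r H
    simp only [List.flatMap_cons, newOf]
    by_cases h : u ∈ s
    · rw [if_pos h]
      have h1 : addAll r (f u ++ us.flatMap f) = addAll r (us.flatMap f) := by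
        simp only [addAll, List.foldl_append]
        rw [show (f u).foldl PySem.Set.add r = addAll r (f u) from rfl,
          addAll_noop fun y hy => H u h y hy]
      rw [h1]
      exact ih s r H
    · rw [if_neg h]
      simp only [List.flatMap_cons, addAll, List.foldl_append]
      show addAll (addAll r (f u)) (us.flatMap f)
          = addAll (addAll r (f u)) ((newOf (PySem.Set.add s u) us).flatMap f)
      refine ih (PySem.Set.add s u) (addAll r (f u)) ?_
      intro x hx y hy
      rcases (PySem.Set.mem_add s u x).mp hx with hx | rfl
      · exact mem_addAll.mpr (Or.inl (H x hx y hy))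
      · exact mem_addAll.mpr (Or.inr hy)

theorem ofList_eq_addAll (us : List Int) : PySem.Set.ofList us = addAll PySem.Set.empty us := by
  rw [PySem.Set.ofList_eq_foldl]; rfl

theorem dedup_flatMap (f : Int → List Int) (us : List Int) :
    PySem.Set.ofList (us.flatMap f)
      = PySem.Set.ofList ((PySem.Set.ofList us).flatMap f) := by
  have h1 := addAll_flatMap_newOf f us PySem.Set.empty PySem.Set.empty (by intro x hx; cases hx)
  have h2 : newOf PySem.Set.empty us = PySem.Set.ofList us := by
    rw [ofList_eq_addAll, addAll_eq_append_newOf]; rfl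
  rw [ofList_eq_addAll, ofList_eq_addAll, h1, h2]

-- B's level step, named
def stepB (sums : List Int) (subset : List Int) : List Int :=
  sums.foldl (fun acc s => subset.foldl (fun acc v => PySem.Set.add acc (s + v)) acc)
    PySem.Set.empty

theorem stepB_eq (sums subset : List Int) :
    stepB sums subset = PySem.Set.ofList (sums.flatMap fun s => subset.map (s + ·)) := by
  rw [ofList_eq_addAll, addAll_flatMap]
  unfold stepB
  refine PySem.List.foldl_congr_mem _ _ _ _ fun acc s _ => ?_
  simp [addAll, List.foldl_map]

theorem mainB :
    ∀ (ls : List (List Int)) (ts : List Int), ts.Nodup →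
      List.foldl stepB ts ls = PySem.Set.ofList (ts.flatMap (csums ls)) := by
  intro ls
  induction ls with
  | nil =>
    intro ts hnd
    have h1 : ts.flatMap (csums []) = ts := by
      simp [csums]
    rw [List.foldl_nil, h1, PySem.Set.ofList_eq_self_of_nodup ts hnd]
  | cons l ls ih =>
    intro ts hnd
    rw [List.foldl_cons, ih (stepB ts l) (by rw [stepB_eq]; exact PySem.Set.nodup_ofList _),
      stepB_eq, ← dedup_flatMap]
    congr 1
    rw [List.flatMap_assoc]
    refine List.flatMap_congr fun t _ => ?_
    simp [csums, List.flatMap_map]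

theorem sum_comb_alt_eq (stuff : List (List Int)) :
    sum_comb_alt stuff = PySem.Set.ofList (csums stuff 0) := by
  show List.foldl stepB (PySem.Set.ofList [0]) stuff = _
  rw [mainB stuff (PySem.Set.ofList [0]) (PySem.Set.nodup_ofList _)]
  have h0 : (PySem.Set.ofList [(0 : Int)]) = [0] := rfl
  rw [h0]
  congr 1
  simp

theorem sum_comb_eq (stuff : List (List Int)) :
    sum_comb stuff = PySem.Set.ofList (csums stuff 0) := by
  unfold sum_comb
  rw [sumCombDfs_eq_dfsS stuff (stuff.length - 0) 0 0 PySem.Set.empty rfl (by omega)]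
  rw [List.drop_zero, dfsS_eq_addAll, ofList_eq_addAll]

-- ===== VERDICT (by name: the statement is the Claim_ definition above) =====
theorem sum_comb_spec : Claim_equal_sum_comb := by
  intro stuff _
  unfold Spec_sum_comb
  rw [sum_comb_eq, sum_comb_alt_eq]
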